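-- pv_equiv track=rewrite | github.com/franciscomcsousa/PF1920 | project1/project1.py | eh_labirinto
-- ===== SOURCE A (Python) =====
-- def eh_labirinto(lab):
-- #verifica se o labirinto e tuplo com comprimento maior ou igual a 3
--     if not isinstance(lab, tuple) or len(lab) < 3:
--         return False
-- #verifica se os subtuplos do labirinto teem comprimento maior ou igual a 3
--     for i in lab:
--         if not isinstance(i, tuple) or len(i) < 3:
--             return False
-- #verifica se existe parede esquerda e direita
--         elif i[0] != 1 or i[len(i) - 1] != 1:
--             return False
-- #verifica se os elementos do labirinto sao inteiros 0 ou 1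
--         for j in i:
--             if j != 1 and j != 0 or not isinstance(j, int):
--                 return False
--     for i in range(len(lab) - 1):
-- #verifica que todos os subtuplos sao de mesmo comprimento
--         if len(lab[i]) != len(lab[i + 1]):
--             return False
--     for i in range(len(lab[0])):
-- #verifica se existe parede superior e inferior
--         if lab[0][i] != 1 or lab[len(lab) - 1][i] != 1:
--             return False
--     return True
-- ===== SOURCE B (Python) =====
-- def eh_labirinto(lab):
--     # single position-aware pass: shape check, then one (r, c) loop that
--     # enforces 0/1 cells and walls on all four borders at once
--     if not isinstance(lab, tuple) or len(lab) < 3: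
--         return False
--     n = len(lab[0])
--     if n < 3 or any(not isinstance(row, tuple) or len(row) != n for row in lab):
--         return False
--     for r in range(len(lab)):
--         for c in range(n):
--             v = lab[r][c]
--             if not isinstance(v, int) or v not in (0, 1):
--                 return False
--             if (r == 0 or r == len(lab) - 1 or c == 0 or c == n - 1) and v != 1:
--                 return False
--     return True
-- ===== Notes on version B (the rewrite author's own statement) =====
-- stated objective: alternative
-- what changed: A's three separate scans (per-row side-wall + element scan, adjacent-length loop, column loop over top/bottom rows) are replaced by one uniform-shape check against n = len(lab[0]) followed by a single position-aware double loop that checks 0/1 values and border walls together.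
import Mathlib
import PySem

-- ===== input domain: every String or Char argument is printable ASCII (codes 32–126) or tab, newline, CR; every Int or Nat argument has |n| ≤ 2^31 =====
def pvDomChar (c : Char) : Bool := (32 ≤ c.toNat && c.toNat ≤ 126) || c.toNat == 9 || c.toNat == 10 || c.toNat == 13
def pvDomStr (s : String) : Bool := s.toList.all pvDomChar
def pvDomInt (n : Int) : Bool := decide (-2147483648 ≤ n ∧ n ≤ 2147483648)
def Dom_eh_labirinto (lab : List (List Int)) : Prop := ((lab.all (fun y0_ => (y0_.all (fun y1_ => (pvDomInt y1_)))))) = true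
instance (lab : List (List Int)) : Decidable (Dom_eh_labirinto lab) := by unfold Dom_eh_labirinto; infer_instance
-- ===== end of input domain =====

-- B folds A's three separate scans into one shape check plus a single
-- position-aware (r, c) loop; same cost, different decomposition ("alternative").
-- On the typed domain (tuples of tuples of ints) A's isinstance tests are vacuous.

-- ===== PORT A =====
-- first for-loop of A: per-row length/side-wall/element checks, early return False
def ehRows : List (List Int) → Bool
  | [] => true
  | i :: rest =>
    if i.length < 3 then false
    -- i[0] and i[len(i)-1]: indices in range here (length ≥ 3), so getD is exact
    else if i.getD 0 0 ≠ 1 ∨ i.getD (i.length - 1) 0 ≠ 1 then false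
    -- inner loop over j ∈ i; `isinstance(j, int)` is vacuous on Int
    else if !(i.all fun j => j == 1 || j == 0) then false
    else ehRows rest

-- second for-loop of A: adjacent rows have equal length
def ehConsec : List (List Int) → Bool
  | a :: b :: t => if a.length ≠ b.length then false else ehConsec (b :: t)
  | _ => true

-- third for-loop of A: top and bottom walls (indices in range when reached)
def ehTopBot (row0 rowLast : List Int) : Bool :=
  (List.range row0.length).all fun i => row0.getD i 0 == 1 && rowLast.getD i 0 == 1

def eh_labirinto (lab : List (List Int)) : Bool :=
  if lab.length < 3 then false
  else if !(ehRows lab) then false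
  else if !(ehConsec lab) then false
  else ehTopBot (lab.getD 0 []) (lab.getD (lab.length - 1) [])

-- ===== PORT B =====
def eh_labirinto_alt (lab : List (List Int)) : Bool :=
  if lab.length < 3 then false
  else
    let n := (lab.getD 0 []).length
    if n < 3 ∨ !(lab.all fun row => row.length == n) then false
    else
      (List.range lab.length).all fun r =>
        (List.range n).all fun c =>
          let v := (lab.getD r []).getD c 0
          (v == 0 || v == 1) &&
          (!(decide (r = 0) || decide (r = lab.length - 1) ||
             decide (c = 0) || decide (c = n - 1)) || v == 1)

-- ===== PRECONDITION & SPEC =====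
def Spec_eh_labirinto (lab : List (List Int)) (out : Bool) : Prop := out = eh_labirinto_alt lab
instance (lab : List (List Int)) (out : Bool) : Decidable (Spec_eh_labirinto lab out) := by unfold Spec_eh_labirinto; infer_instance

-- ===== CLAIM (what is proved, stated in full; the proofs are below) =====
def Claim_equal_eh_labirinto : Prop := ∀ (lab : List (List Int)), Dom_eh_labirinto lab → Spec_eh_labirinto lab (eh_labirinto lab)

-- ===== LEMMAS AND PROOFS =====

-- the common characterisation both ports are reduced to
def MazeP (lab : List (List Int)) : Prop :=
  3 ≤ lab.length ∧ 3 ≤ (lab.getD 0 []).length ∧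
  (∀ row ∈ lab, row.length = (lab.getD 0 []).length) ∧
  (∀ r < lab.length, ∀ c < (lab.getD 0 []).length,
    ((lab.getD r []).getD c 0 = 0 ∨ (lab.getD r []).getD c 0 = 1) ∧
    ((r = 0 ∨ r = lab.length - 1 ∨ c = 0 ∨ c = (lab.getD 0 []).length - 1) →
      (lab.getD r []).getD c 0 = 1))

theorem ehRows_iff : ∀ L : List (List Int), ehRows L = true ↔
    ∀ i ∈ L, 3 ≤ i.length ∧ i.getD 0 0 = 1 ∧ i.getD (i.length - 1) 0 = 1 ∧
      ∀ j ∈ i, j = 1 ∨ j = 0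
  | [] => by simp [ehRows]
  | i :: rest => by
    simp only [ehRows, List.mem_cons]
    split_ifs with h1 h2 h3
    · constructor
      · intro h; exact absurd h (by simp)
      · intro h; exact absurd (h i (Or.inl rfl)).1 (by omega)
    · constructor
      · intro h; exact absurd h (by simp)
      · intro h; rcases h i (Or.inl rfl) with ⟨_, hh, ht, _⟩; tauto
    · constructor
      · intro h; exact absurd h (by simp)
      · intro h
        rcases h i (Or.inl rfl) with ⟨_, _, _, hel⟩
        simp only [Bool.not_eq_true', List.all_eq_false] at h3
        rcases h3 with ⟨j, hj, hjv⟩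
        rcases hel j hj with h' | h' <;> simp [h'] at hjv
    · rw [ehRows_iff rest]
      rw [not_or] at h2
      rcases h2 with ⟨h2a, h2b⟩
      rw [not_not] at h2a h2b
      constructor
      · intro h x hx
        rcases hx with rfl | hx
        · refine ⟨by omega, h2a, h2b, fun j hj => ?_⟩
          simp only [Bool.not_eq_true', Bool.not_eq_false, List.all_eq_true] at h3
          have := h3 j hj
          rcases eq_or_ne j 1 with h' | h'
          · exact Or.inl h'
          · right; simpa [h'] using this
        · exact h x hx
      · intro h x hx
        exact h x (Or.inr hx)

theorem ehConsec_iff : ∀ L : List (List Int), ehConsec L = true ↔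
    L.IsChain (fun a b => a.length = b.length)
  | [] => by simp [ehConsec, List.isChain_nil]
  | [a] => by simp [ehConsec, List.isChain_singleton]
  | a :: b :: t => by
    simp only [ehConsec, List.isChain_cons_cons]
    split_ifs with h
    · simp [h]
    · rw [ehConsec_iff (b :: t)]; tauto

theorem chain_len (h : List Int) (t : List (List Int)) :
    (h :: t).IsChain (fun a b => a.length = b.length) ↔
    ∀ r ∈ h :: t, r.length = h.length := by
  induction t generalizing h with
  | nil => simp [List.isChain_singleton]
  | cons b t' ih =>
    rw [List.isChain_cons_cons, ih]
    constructor
    · rintro ⟨e, hall⟩ r hr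
      rcases List.mem_cons.mp hr with rfl | hr
      · rfl
      · rw [hall r hr, ← e]
    · intro hall
      refine ⟨(hall b (by simp)).symm, fun r hr => ?_⟩
      rw [hall r (List.mem_cons_of_mem _ hr), hall b (by simp)]

theorem ehTopBot_iff (r0 rl : List Int) : ehTopBot r0 rl = true ↔
    ∀ i < r0.length, r0.getD i 0 = 1 ∧ rl.getD i 0 = 1 := by
  simp [ehTopBot, List.all_eq_true, List.mem_range]

theorem getD_mem (lab : List (List Int)) (r : Nat) (h : r < lab.length) :
    lab.getD r [] ∈ lab := by
  rw [List.getD_eq_getElem lab [] h]; exact List.getElem_mem h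

theorem A_conj (lab : List (List Int)) : eh_labirinto lab = true ↔
    3 ≤ lab.length ∧ ehRows lab = true ∧ ehConsec lab = true ∧
      ehTopBot (lab.getD 0 []) (lab.getD (lab.length - 1) []) = true := by
  simp only [eh_labirinto]
  split_ifs with h1 h2 h3
  · simp only [Bool.false_eq_true, false_iff]; rintro ⟨h, _⟩; omega
  · simp only [Bool.false_eq_true, false_iff]; rintro ⟨_, h, _⟩
    rw [Bool.not_eq_true'] at h2; simp [h2] at h
  · simp only [Bool.false_eq_true, false_iff]; rintro ⟨_, _, h, _⟩
    rw [Bool.not_eq_true'] at h3; simp [h3] at h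
  · rw [Bool.not_eq_true', Bool.not_eq_false] at h2 h3
    constructor
    · intro h; exact ⟨by omega, h2, h3, h⟩
    · rintro ⟨_, _, _, h⟩; exact h

theorem A_iff (lab : List (List Int)) : eh_labirinto lab = true ↔ MazeP lab := by
  rw [A_conj, ehRows_iff, ehConsec_iff, ehTopBot_iff]
  unfold MazeP
  constructor
  · rintro ⟨hlen, hrows, hchain, htb⟩
    obtain ⟨h0, t, rfl⟩ : ∃ h0 t, lab = h0 :: t := by
      cases lab with
      | nil => simp at hlen
      | cons a t => exact ⟨a, t, rfl⟩
    set lab := h0 :: t with hlab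
    have hd0 : lab.getD 0 [] = h0 := rfl
    have hlens := (chain_len h0 t).mp hchain
    refine ⟨hlen, (hrows h0 (by simp [hlab])).1, hlens, ?_⟩
    intro r hr c hc
    rw [hd0] at hc
    have hrow : lab.getD r [] ∈ lab := getD_mem lab r hr
    have hrlen : (lab.getD r []).length = h0.length := hlens _ hrow
    have hvmem : (lab.getD r []).getD c 0 ∈ lab.getD r [] := by
      rw [List.getD_eq_getElem _ 0 (by omega)]
      exact List.getElem_mem (by omega)
    constructor
    · rcases (hrows _ hrow).2.2.2 _ hvmem with h' | h'
      · exact Or.inr h'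
      · exact Or.inl h'
    · rintro (rfl | h' | rfl | h')
      · exact (htb c (by rw [hd0]; exact hc)).1
      · subst h'; exact (htb c (by rw [hd0]; exact hc)).2
      · exact (hrows _ hrow).2.1
      · subst h'
        have := (hrows _ hrow).2.2.1
        rwa [hrlen] at this
  · rintro ⟨hlen, hn, hlens, hcell⟩
    obtain ⟨h0, t, rfl⟩ : ∃ h0 t, lab = h0 :: t := by
      cases lab with
      | nil => simp at hlen
      | cons a t => exact ⟨a, t, rfl⟩
    set lab := h0 :: t with hlab
    have hd0 : lab.getD 0 [] = h0 := rfl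
    refine ⟨hlen, ?_, (chain_len h0 t).mpr hlens, ?_⟩
    · intro i hi
      obtain ⟨r, hr, rfl⟩ := List.mem_iff_getElem.mp hi
      have hg : lab.getD r [] = lab[r] := List.getD_eq_getElem lab [] hr
      have hilen : (lab[r]).length = (lab.getD 0 []).length :=
        hlens _ (List.getElem_mem hr)
      have hn' : 3 ≤ (lab.getD 0 []).length := hn
      refine ⟨by omega, ?_, ?_, ?_⟩
      · have := (hcell r hr 0 (by omega)).2 (by tauto)
        rwa [hg] at this
      · have := (hcell r hr ((lab.getD 0 []).length - 1) (by omega)).2 (by tauto)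
        rwa [hg, ← hilen] at this
      · intro j hj
        obtain ⟨c, hc, rfl⟩ := List.mem_iff_getElem.mp hj
        have hv : (lab.getD r []).getD c 0 = (lab[r])[c] := by
          rw [hg]; exact List.getD_eq_getElem _ 0 hc
        rcases (hcell r hr c (by omega)).1 with h' | h' <;> rw [← hv]
        · exact Or.inr h'
        · exact Or.inl h'
    · intro c hc
      exact ⟨(hcell 0 (by omega) c hc).2 (Or.inl rfl),
             (hcell (lab.length - 1) (by omega) c hc).2 (Or.inr (Or.inl rfl))⟩

theorem cellBool (v : Int) (b : Bool) :
    ((v == 0 || v == 1) && (!b || v == 1)) = true ↔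
    (v = 0 ∨ v = 1) ∧ (b = true → v = 1) := by
  cases b <;> simp <;> tauto

theorem B_iff (lab : List (List Int)) : eh_labirinto_alt lab = true ↔ MazeP lab := by
  simp only [eh_labirinto_alt]
  unfold MazeP
  split_ifs with h1 h2
  · simp only [Bool.false_eq_true, false_iff]; rintro ⟨h, _⟩; omega
  · simp only [Bool.false_eq_true, false_iff]
    rintro ⟨_, hn, hlens, _⟩
    rcases h2 with h' | h'
    · omega
    · simp only [Bool.not_eq_true', List.all_eq_false] at h'
      obtain ⟨row, hrow, hne⟩ := h'
      exact absurd (hlens row hrow) (by simpa using hne)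
  · rw [not_or] at h2
    obtain ⟨h2a, h2b⟩ := h2
    rw [Bool.not_eq_true', Bool.not_eq_false] at h2b
    simp only [List.all_eq_true, List.mem_range, cellBool, Bool.or_eq_true,
      decide_eq_true_eq, or_assoc]
    constructor
    · intro h
      exact ⟨by omega, by omega,
             fun row hrow => by simpa using List.all_eq_true.mp h2b row hrow,
             fun r hr c hc => h r hr c hc⟩
    · rintro ⟨_, _, _, hcell⟩ r hr c hc
      exact hcell r hr c hc

-- ===== VERDICT (by name: the statement is the Claim_ definition above) =====
theorem eh_labirinto_spec : Claim_equal_eh_labirinto := by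
  intro lab _
  unfold Spec_eh_labirinto
  have := (A_iff lab).trans (B_iff lab).symm
  rcases h1 : eh_labirinto lab <;> rcases h2 : eh_labirinto_alt lab <;>
    simp [h1, h2] at this ⊢ <;> tauto
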